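-- pv_equiv track=rewrite | github.com/naa/FreeFermionsLimitShapes | azteclozenge.py | pattern_to_tableau
-- ===== SOURCE A (Python) =====
-- def pattern_to_tableau(pat):
--     revpt=reversed(pat)
--     n=len(pat)
--     pre=[]
--     res=[]
--     for i,l in enumerate(revpt):
--         res.append([])
--         pre=pre+[0]
--         for j in range(i+1):
--             res[j].extend([i+1]*(l[j]-pre[j]))
--         pre=l
--     return res
-- ===== SOURCE B (Python) =====
-- def pattern_to_tableau(pat):
--     n = len(pat)
--     res = []
--     for j in range(n):
--         # cuts[k] = number of cells of row j filled after levels j..j+k (clamped diffs)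
--         cuts = []
--         total = 0
--         for i in range(j, n):
--             row_above = pat[n - i] if i > 0 else []
--             prev = row_above[j] if j < len(row_above) else 0
--             total += max(pat[n - 1 - i][j] - prev, 0)
--             cuts.append(total)
--         # cell c of row j holds j+1 plus the number of level boundaries at or before c
--         res.append([j + 1 + sum(1 for t in cuts if t <= c) for c in range(total)])
--     return res
-- ===== Notes on version B (the rewrite author's own statement) =====
-- stated objective: alternative
-- what changed: B never concatenates runs: per row it first computes the prefix sums of the clamped GT differences ('cuts') and then fills each cell position individually, deriving the cell's entry by counting how many cuts lie at or before that position (inverting the prefix-sum map), instead of A's level-major sweep that extends all rows by replicated runs through a shared 'pre' accumulator.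
import Mathlib
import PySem

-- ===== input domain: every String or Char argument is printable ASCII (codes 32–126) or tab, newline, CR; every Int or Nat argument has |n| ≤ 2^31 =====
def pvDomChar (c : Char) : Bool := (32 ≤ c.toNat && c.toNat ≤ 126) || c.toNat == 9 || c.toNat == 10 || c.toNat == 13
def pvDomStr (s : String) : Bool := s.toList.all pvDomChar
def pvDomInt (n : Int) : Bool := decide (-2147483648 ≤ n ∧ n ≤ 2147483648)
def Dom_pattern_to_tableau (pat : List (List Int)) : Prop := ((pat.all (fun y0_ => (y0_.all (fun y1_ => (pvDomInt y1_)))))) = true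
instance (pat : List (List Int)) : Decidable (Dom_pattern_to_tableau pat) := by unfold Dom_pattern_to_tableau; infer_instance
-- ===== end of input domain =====

-- B fills each row cell-by-cell, deriving every cell's entry from the prefix sums of the
-- clamped GT differences ('cuts') by counting the cuts at or before the cell's position,
-- instead of A's level-major sweep extending all rows by runs through a shared 'pre' row.

-- ===== PORT A =====
def pattern_to_tableau (pat : List (List Int)) : List (List Int) :=
  let revpt := pat.reverse
  let st := (PySem.List.enumerate revpt 0).foldl
    (fun (st : List Int × List (List Int)) il =>
      let res0 := st.2 ++ [[]]
      let pre := st.1 ++ [0]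
      let res1 := (PySem.List.pyRange 0 (il.1 + 1) 1).foldl
        (fun r j => r.modify j.toNat
          (fun row => row ++ List.replicate
            (PySem.List.pyGetD il.2 j 0 - PySem.List.pyGetD pre j 0).toNat (il.1 + 1)))
        res0
      (il.2, res1))
    (([] : List Int), ([] : List (List Int)))
  st.2

-- ===== PORT B =====
-- previous-level row: pat[n - i] if i > 0 else []
def pvPrevRow (pat : List (List Int)) (n i : Int) : List Int :=
  if i > 0 then PySem.List.pyGetD pat (n - i) [] else []

-- the GT difference d = pat[n-1-i][j] - prev for row j, level i
def pvDiff (pat : List (List Int)) (j i : Int) : Int :=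
  PySem.List.pyGetD (PySem.List.pyGetD pat ((pat.length : Int) - 1 - i) []) j 0 -
    (if j < ((pvPrevRow pat (pat.length : Int) i).length : Int)
      then PySem.List.pyGetD (pvPrevRow pat (pat.length : Int) i) j 0 else 0)

-- body of B's inner loop: extend the running total by max(d, 0) and record the cut
def pvStepB (pat : List (List Int)) (j : Int) (st : Int × List Int) (i : Int) :
    Int × List Int :=
  let total := st.1 + max (pvDiff pat j i) 0
  (total, st.2 ++ [total])

-- one row of B: build (total, cuts), then fill each cell by counting cuts ≤ its position
def pvRowB (pat : List (List Int)) (j : Int) : List Int :=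
  let n : Int := pat.length
  let st := (PySem.List.pyRange j n 1).foldl (pvStepB pat j) ((0 : Int), ([] : List Int))
  (PySem.List.pyRange 0 st.1 1).map
    (fun c => j + 1 + ((st.2.countP (fun t => decide (t ≤ c))) : Int))

def pattern_to_tableau_alt (pat : List (List Int)) : List (List Int) :=
  (PySem.List.pyRange 0 (pat.length : Int) 1).map (fun j => pvRowB pat j)

-- ===== PRECONDITION & SPEC =====
-- Pre_ excludes exactly the inputs on which the Python A raises IndexError:
-- some row k is shorter than n - k, so an l[j] or pre[j] access goes out of range.
def Pre_pattern_to_tableau (pat : List (List Int)) : Prop :=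
  ∀ k ∈ List.range pat.length, pat.length ≤ (pat.getD k []).length + k
instance (pat : List (List Int)) : Decidable (Pre_pattern_to_tableau pat) := by
  unfold Pre_pattern_to_tableau; infer_instance

def pvWitness_pattern_to_tableau : List (List Int) := [[2, 1], [3]]

def Spec_pattern_to_tableau (pat : List (List Int)) (out : List (List Int)) : Prop := out = pattern_to_tableau_alt pat
instance (pat : List (List Int)) (out : List (List Int)) : Decidable (Spec_pattern_to_tableau pat out) := by unfold Spec_pattern_to_tableau; infer_instance

-- ===== CLAIM (what is proved, stated in full; the proofs are below) =====
def Claim_equal_pattern_to_tableau : Prop := ∀ (pat : List (List Int)), Dom_pattern_to_tableau pat → Pre_pattern_to_tableau pat → Spec_pattern_to_tableau pat (pattern_to_tableau pat)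

-- ===== LEMMAS AND PROOFS =====

-- -------- A-side characterisation (level-major sweep = per-row runs) --------

-- the run A appends to row j at level m (l = level-m row of reversed pat, pre = the previous one)
def pvRun (m : Nat) (pre l : List Int) (j : Nat) : List Int :=
  List.replicate
    (PySem.List.pyGetD l (j : Int) 0 - PySem.List.pyGetD (pre ++ [0]) (j : Int) 0).toNat
    ((m : Int) + 1)

-- everything A's remaining levels ls (starting at level m, previous row pre) append to row j
def pvContrib : List (List Int) → List Int → Nat → Nat → List Int
  | [], _, _, _ => []
  | l :: ls, pre, m, j =>
      (if j ≤ m then pvRun m pre l j else []) ++ pvContrib ls l (m + 1) j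

-- A's loop body as a named step function (definitionally the lambda in the port)
def pvStep (st : List Int × List (List Int)) (il : Int × List Int) :
    List Int × List (List Int) :=
  let res0 := st.2 ++ [[]]
  let pre := st.1 ++ [0]
  let res1 := (PySem.List.pyRange 0 (il.1 + 1) 1).foldl
    (fun r j => r.modify j.toNat
      (fun row => row ++ List.replicate
        (PySem.List.pyGetD il.2 j 0 - PySem.List.pyGetD pre j 0).toNat (il.1 + 1)))
    res0
  (il.2, res1)

-- previous row seen by A when level m starts
def pvPreAt (pat : List (List Int)) (m : Nat) : List Int :=
  if m = 0 then [] else pat.reverse.getD (m - 1) []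

-- the run of value i+1 for row j, expressed through pvDiff
def pvBrun (pat : List (List Int)) (j : Nat) (i : Int) : List Int :=
  List.replicate (pvDiff pat (j : Int) i).toNat (i + 1)

lemma foldl_range_modify {α : Type} (f : Nat → α → α) (m : Nat) (res : List α) :
    (List.range m).foldl (fun r k => r.modify k (f k)) res
      = res.mapIdx (fun k x => if k < m then f k x else x) := by
  induction m with
  | zero =>
      apply List.ext_getElem
      · simp
      · intro k h1 h2; simp [List.getElem_mapIdx]
  | succ m ih =>
      rw [List.range_succ, List.foldl_append, ih]
      simp only [List.foldl_cons, List.foldl_nil]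
      apply List.ext_getElem
      · simp
      · intro k h1 h2
        simp only [List.getElem_modify, List.getElem_mapIdx]
        by_cases hk : m = k
        · subst hk
          simp [show m < m + 1 by omega]
        · by_cases h2' : k < m
          · simp [hk, h2', show k < m + 1 by omega]
          · simp [hk, h2', show ¬ (k < m + 1) by omega]

lemma inner_loop {α : Type} (g : Int → α → α) (s : Nat) (res : List α)
    (h : res.length = s + 1) :
    (PySem.List.pyRange 0 ((s : Int) + 1) 1).foldl (fun r j => r.modify j.toNat (g j)) res
      = res.mapIdx (fun k x => g (k : Int) x) := by
  have hs : ((s : Int) + 1) = ((s + 1 : Nat) : Int) := by push_cast; ring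
  rw [hs, PySem.List.pyRange_zero_nat, List.foldl_map]
  simp only [Int.toNat_natCast]
  rw [foldl_range_modify]
  apply List.ext_getElem
  · simp
  · intro k h1 h2
    have hk : k < s + 1 := by
      simp only [List.length_mapIdx] at h1; omega
    simp only [List.getElem_mapIdx, if_pos hk]

lemma inv_loop : ∀ (ls : List (List Int)) (pre : List Int) (res : List (List Int)),
    ((PySem.List.enumerate ls (res.length : Int)).foldl pvStep (pre, res)).2
      = (res ++ List.replicate ls.length []).mapIdx
          (fun j row => row ++ pvContrib ls pre res.length j) := by
  intro ls
  induction ls with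
  | nil =>
      intro pre res
      simp only [PySem.List.enumerate_nil, List.foldl_nil, List.length_nil,
        List.replicate_zero, List.append_nil, pvContrib]
      apply List.ext_getElem
      · simp
      · intro k h1 h2; simp [List.getElem_mapIdx]
  | cons l t ih =>
      intro pre res
      rw [PySem.List.enumerate_cons, List.foldl_cons]
      have hstep : pvStep (pre, res) ((res.length : Int), l)
          = (l, (res ++ [[]]).mapIdx (fun k row => row ++ pvRun res.length pre l k)) := by
        unfold pvStep
        exact congrArg (Prod.mk l)
          (inner_loop
            (fun j row => row ++ List.replicate
              (PySem.List.pyGetD l j 0 - PySem.List.pyGetD (pre ++ [0]) j 0).toNat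
              ((res.length : Int) + 1))
            res.length (res ++ [[]]) (by simp))
      rw [hstep]
      have hlen1 : ((res.length : Int) + 1)
          = (((res ++ [[]]).mapIdx (fun k row => row ++ pvRun res.length pre l k)).length : Int) := by
        simp
      rw [hlen1, ih]
      simp only [List.length_mapIdx, List.length_append, List.length_singleton]
      apply List.ext_getElem
      · simp
      · intro k h1 h2
        simp only [List.getElem_mapIdx, List.getElem_append, List.length_mapIdx,
          List.length_append, List.length_singleton, pvContrib]
        by_cases hk : k < res.length
        · simp only [dif_pos (show k < res.length + 1 by omega), dif_pos hk,
            if_pos (show k ≤ res.length by omega), List.append_assoc]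
        · by_cases hk2 : k = res.length
          · subst hk2
            simp
          · have hk3 : ¬ k < res.length + 1 := by omega
            simp only [dif_neg hk, dif_neg hk3, List.getElem_replicate,
              if_neg (show ¬ k ≤ res.length by omega), List.nil_append]

lemma A_eq (pat : List (List Int)) :
    pattern_to_tableau pat
      = (List.range pat.length).map (fun j => pvContrib pat.reverse [] 0 j) := by
  have h := inv_loop pat.reverse [] []
  simp only [List.length_nil, Nat.cast_zero, List.nil_append, List.length_reverse] at h
  have h0 : pattern_to_tableau pat
      = ((PySem.List.enumerate pat.reverse 0).foldl pvStep ([], [])).2 := rfl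
  rw [h0, h]
  apply List.ext_getElem
  · simp
  · intro k h1 h2
    simp only [List.length_mapIdx, List.length_replicate] at h1
    simp [List.getElem_mapIdx]

lemma append_zero_getD (q : List Int) (j : Nat) :
    PySem.List.pyGetD (q ++ [0]) (j : Int) 0
      = if (j : Int) < (q.length : Int) then PySem.List.pyGetD q (j : Int) 0 else 0 := by
  simp only [PySem.List.pyGetD_natCast]
  by_cases h : j < q.length
  · have h' : (j : Int) < (q.length : Int) := by exact_mod_cast h
    rw [if_pos h', List.getD_eq_getElem?_getD, List.getD_eq_getElem?_getD,
      List.getElem?_append_left h]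
  · have h' : ¬ (j : Int) < (q.length : Int) := by exact_mod_cast h
    rw [if_neg h', List.getD_eq_getElem?_getD, List.getElem?_append_right (by omega)]
    by_cases h2 : j = q.length
    · subst h2; simp
    · rw [show j - q.length = (j - q.length - 1) + 1 by omega]
      simp

lemma prevRow_eq (pat : List (List Int)) (m : Nat) (hm : m < pat.length) :
    pvPrevRow pat (pat.length : Int) (m : Int) = pvPreAt pat m := by
  unfold pvPrevRow pvPreAt
  by_cases h0 : m = 0
  · subst h0; simp
  · have hpos : (0 : Int) < (m : Int) := by exact_mod_cast Nat.pos_of_ne_zero h0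
    rw [if_pos hpos, if_neg h0]
    have hcast : (pat.length : Int) - (m : Int) = ((pat.length - m : Nat) : Int) := by
      omega
    rw [hcast, PySem.List.pyGetD_natCast]
    have hlt : pat.length - m < pat.length := by omega
    have hlt' : m - 1 < pat.reverse.length := by simp; omega
    rw [List.getD_eq_getElem?_getD, List.getD_eq_getElem?_getD,
      List.getElem?_eq_getElem hlt, List.getElem?_eq_getElem hlt']
    simp only [Option.getD_some]
    rw [List.getElem_reverse]
    congr 1
    omega

lemma level_row_eq (pat : List (List Int)) (m : Nat) (hm : m < pat.length) :
    PySem.List.pyGetD pat ((pat.length : Int) - 1 - (m : Int)) []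
      = pat.reverse[m]'(by simpa using hm) := by
  have hcast : (pat.length : Int) - 1 - (m : Int) = ((pat.length - 1 - m : Nat) : Int) := by
    omega
  rw [hcast, PySem.List.pyGetD_natCast]
  have hlt : pat.length - 1 - m < pat.length := by omega
  rw [List.getD_eq_getElem?_getD, List.getElem?_eq_getElem hlt]
  simp only [Option.getD_some]
  rw [List.getElem_reverse]

lemma run_eq (pat : List (List Int)) (m j : Nat) (hm : m < pat.length) :
    pvRun m (pvPreAt pat m) (pat.reverse[m]'(by simpa using hm)) j
      = pvBrun pat j (m : Int) := by
  unfold pvRun pvBrun pvDiff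
  rw [level_row_eq pat m hm, prevRow_eq pat m hm, append_zero_getD]

lemma contrib_eq (pat : List (List Int)) :
    ∀ (t m j : Nat), m + t = pat.length → j < pat.length →
      pvContrib (pat.reverse.drop m) (pvPreAt pat m) m j
        = (PySem.List.pyRange (max (j : Int) (m : Int)) (pat.length : Int) 1).flatMap
            (pvBrun pat j) := by
  intro t
  induction t with
  | zero =>
      intro m j hmt hj
      have hm : m = pat.length := by omega
      subst hm
      rw [List.drop_eq_nil_of_le (by simp)]
      have hmax : max (j : Int) ((pat.length : Nat) : Int) = ((pat.length : Nat) : Int) := by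
        have : (j : Int) ≤ (pat.length : Int) := by exact_mod_cast Nat.le_of_lt hj
        omega
      rw [hmax, PySem.List.pyRange_one_eq_nil (le_refl _)]
      simp [pvContrib]
  | succ t ih =>
      intro m j hmt hj
      have hm : m < pat.length := by omega
      have hmr : m < pat.reverse.length := by simpa using hm
      rw [List.drop_eq_getElem_cons hmr]
      rw [pvContrib]
      have hIH := ih (m + 1) j (by omega) hj
      have hpre1 : pvPreAt pat (m + 1) = pat.reverse[m]'hmr := by
        unfold pvPreAt
        rw [if_neg (by omega)]
        simp only [Nat.add_sub_cancel]
        rw [List.getD_eq_getElem?_getD, List.getElem?_eq_getElem hmr]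
        simp
      rw [hpre1] at hIH
      by_cases hjm : j ≤ m
      · have hmax1 : max (j : Int) (m : Int) = (m : Int) := by
          have : (j : Int) ≤ (m : Int) := by exact_mod_cast hjm
          omega
        have hmax2 : max (j : Int) ((m + 1 : Nat) : Int) = ((m + 1 : Nat) : Int) := by
          have : (j : Int) ≤ ((m + 1 : Nat) : Int) := by exact_mod_cast (by omega : j ≤ m + 1)
          omega
        have hcast : ((m + 1 : Nat) : Int) = (m : Int) + 1 := by push_cast; ring
        rw [if_pos hjm, hIH, hmax1, hmax2, hcast]
        conv_rhs => rw [PySem.List.pyRange_one_cons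
          (show (m : Int) < (pat.length : Int) by exact_mod_cast hm)]
        rw [List.flatMap_cons]
        congr 1
        exact run_eq pat m j hm
      · have hjm' : m + 1 ≤ j := by omega
        have hmax1 : max (j : Int) (m : Int) = (j : Int) := by
          have : (m : Int) ≤ (j : Int) := by exact_mod_cast (by omega : m ≤ j)
          omega
        have hmax2 : max (j : Int) ((m + 1 : Nat) : Int) = (j : Int) := by
          have : ((m + 1 : Nat) : Int) ≤ (j : Int) := by exact_mod_cast hjm'
          omega
        rw [if_neg hjm, hIH, hmax1, hmax2, List.nil_append]

-- -------- B-side characterisation (prefix-sum inversion = per-row runs) --------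

-- prefix sums of the clamped differences ('cuts'), starting from acc
def pvCuts (acc : Nat) : List Nat → List Nat
  | [] => []
  | c :: cs => (acc + c) :: pvCuts (acc + c) cs

-- rows as runs: replicate c0 of v, then runs of v+1, ...
def pvRuns (v : Int) : List Nat → List Int
  | [] => []
  | c :: cs => List.replicate c v ++ pvRuns (v + 1) cs

lemma pvCuts_shift (cs : List Nat) : ∀ (acc : Nat),
    pvCuts acc cs = (pvCuts 0 cs).map (· + acc) := by
  induction cs with
  | nil => intro acc; simp [pvCuts]
  | cons c cs ih =>
      intro acc
      simp only [pvCuts, List.map_cons, Nat.zero_add]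
      congr 1
      · omega
      · rw [ih (acc + c), ih c, List.map_map]
        apply List.map_congr_left
        intro x _
        simp only [Function.comp_apply]
        omega

lemma foldB (pat : List (List Int)) (j : Int) :
    ∀ (L : List Int) (acc : Nat) (pref : List Int),
    L.foldl (pvStepB pat j) ((acc : Int), pref)
      = (((acc + (L.map (fun i => (pvDiff pat j i).toNat)).sum : Nat) : Int),
         pref ++ (pvCuts acc (L.map (fun i => (pvDiff pat j i).toNat))).map
           (fun (t : Nat) => (t : Int))) := by
  intro L
  induction L with
  | nil => intro acc pref; simp [pvCuts]
  | cons i L ih =>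
      intro acc pref
      rw [List.foldl_cons]
      have hstep : pvStepB pat j ((acc : Int), pref) i
          = (((acc + (pvDiff pat j i).toNat : Nat) : Int),
             pref ++ [((acc + (pvDiff pat j i).toNat : Nat) : Int)]) := by
        unfold pvStepB
        have h : (acc : Int) + max (pvDiff pat j i) 0
            = ((acc + (pvDiff pat j i).toNat : Nat) : Int) := by
          push_cast; omega
        simp only [h]
      rw [hstep, ih (acc + (pvDiff pat j i).toNat) (pref ++ [_])]
      simp only [List.map_cons, List.sum_cons, pvCuts, List.append_assoc,
        List.singleton_append]
      congr 2
      omega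

lemma cells_eq_runs : ∀ (cs : List Nat) (v : Int),
    (List.range cs.sum).map
        (fun c => v + 1 + (((pvCuts 0 cs).countP (fun t => decide (t ≤ c))) : Int))
      = pvRuns (v + 1) cs := by
  intro cs
  induction cs with
  | nil => intro v; simp [pvRuns]
  | cons c0 cs ih =>
      intro v
      have hsum : (c0 :: cs).sum = c0 + cs.sum := by simp
      rw [hsum, List.range_add, List.map_append, List.map_map]
      have hcuts : pvCuts 0 (c0 :: cs) = c0 :: (pvCuts 0 cs).map (· + c0) := by
        simp only [pvCuts, Nat.zero_add]
        rw [pvCuts_shift cs c0]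
      rw [hcuts]
      have hrepl : (List.range c0).map (fun _ => v + 1) = List.replicate c0 (v + 1) := by
        rw [List.map_const', List.length_range]
      have hpart1 : (List.range c0).map
          (fun c => v + 1 + (((c0 :: (pvCuts 0 cs).map (· + c0)).countP
            (fun t => decide (t ≤ c))) : Int))
          = List.replicate c0 (v + 1) := by
        rw [← hrepl]
        apply List.map_congr_left
        intro c hc
        have hc0 : c < c0 := List.mem_range.mp hc
        have hcnt : (c0 :: (pvCuts 0 cs).map (· + c0)).countP (fun t => decide (t ≤ c)) = 0 := by
          rw [List.countP_cons, List.countP_map]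
          have h1 : (decide (c0 ≤ c)) = false := by simp; omega
          rw [h1]
          simp only [Bool.false_eq_true, if_false, Nat.add_zero]
          rw [List.countP_eq_zero]
          intro t _
          simp only [Function.comp_apply, decide_eq_true_eq]
          omega
        rw [hcnt]
        simp
      have hpart2 : (List.range cs.sum).map
          ((fun c => v + 1 + (((c0 :: (pvCuts 0 cs).map (· + c0)).countP
            (fun t => decide (t ≤ c))) : Int)) ∘ (fun x => c0 + x))
          = pvRuns (v + 1 + 1) cs := by
        rw [← ih (v + 1)]
        apply List.map_congr_left
        intro c _
        simp only [Function.comp_apply]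
        have hcnt : (c0 :: (pvCuts 0 cs).map (· + c0)).countP
            (fun t => decide (t ≤ c0 + c))
            = 1 + (pvCuts 0 cs).countP (fun t => decide (t ≤ c)) := by
          rw [List.countP_cons, List.countP_map]
          have h1 : (decide (c0 ≤ c0 + c)) = true := by simp
          rw [h1]
          have h2 : ((fun t => decide (t ≤ c0 + c)) ∘ (· + c0))
              = (fun t => decide (t ≤ c)) := by
            funext t
            simp only [Function.comp_apply, decide_eq_decide]
            omega
          rw [h2]
          simp [Nat.add_comm]
        rw [hcnt]
        push_cast
        ring
      rw [hpart1, hpart2]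
      rfl

lemma flatMap_runs (f : Int → Nat) : ∀ (k : Nat) (a b : Int), (b - a).toNat ≤ k →
    (PySem.List.pyRange a b 1).flatMap (fun i => List.replicate (f i) (i + 1))
      = pvRuns (a + 1) ((PySem.List.pyRange a b 1).map f) := by
  intro k
  induction k with
  | zero =>
      intro a b h
      have hba : b ≤ a := by omega
      rw [PySem.List.pyRange_one_eq_nil hba]
      simp [pvRuns]
  | succ k ih =>
      intro a b h
      by_cases hab : a < b
      · rw [PySem.List.pyRange_one_cons hab]
        simp only [List.flatMap_cons, List.map_cons, pvRuns]
        rw [ih (a + 1) b (by omega)]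
      · have hba : b ≤ a := by omega
        rw [PySem.List.pyRange_one_eq_nil hba]
        simp [pvRuns]

-- pvRowB with the fold written out (definitional unfolding of the lets)
lemma pvRowB_def (pat : List (List Int)) (j : Int) :
    pvRowB pat j
      = (PySem.List.pyRange 0
          (((PySem.List.pyRange j (pat.length : Int) 1).foldl (pvStepB pat j)
            ((0 : Int), ([] : List Int))).1) 1).map
          (fun c => j + 1 +
            ((((PySem.List.pyRange j (pat.length : Int) 1).foldl (pvStepB pat j)
              ((0 : Int), ([] : List Int))).2.countP (fun t => decide (t ≤ c))) : Int)) := rfl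

lemma rowB_eq (pat : List (List Int)) (j : Nat) :
    pvRowB pat (j : Int)
      = pvRuns ((j : Int) + 1)
          ((PySem.List.pyRange (j : Int) (pat.length : Int) 1).map
            (fun i => (pvDiff pat (j : Int) i).toNat)) := by
  have h0 : ((0 : Int), ([] : List Int)) = (((0 : Nat) : Int), ([] : List Int)) := by
    norm_num
  rw [pvRowB_def, h0, foldB pat (j : Int) _ 0 []]
  simp only [Nat.zero_add, List.nil_append]
  set cs := (PySem.List.pyRange (j : Int) (pat.length : Int) 1).map
    (fun i => (pvDiff pat (j : Int) i).toNat) with hcs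
  rw [PySem.List.pyRange_zero_nat, List.map_map]
  rw [← cells_eq_runs cs (j : Int)]
  apply List.map_congr_left
  intro c _
  simp only [Function.comp_apply, List.countP_map]
  have hfun : ((fun t : Int => decide (t ≤ (c : Int))) ∘ fun (t : Nat) => (t : Int))
      = (fun t : Nat => decide (t ≤ c)) := by
    funext t
    simp only [Function.comp_apply, decide_eq_decide]
    exact_mod_cast Iff.rfl
  rw [hfun]

lemma B_eq (pat : List (List Int)) :
    pattern_to_tableau_alt pat
      = (List.range pat.length).map (fun (j : Nat) =>
          pvRuns ((j : Int) + 1)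
            ((PySem.List.pyRange (j : Int) (pat.length : Int) 1).map
              (fun i => (pvDiff pat (j : Int) i).toNat))) := by
  show (PySem.List.pyRange 0 (pat.length : Int) 1).map (fun j => pvRowB pat j) = _
  rw [PySem.List.pyRange_zero_nat, List.map_map]
  apply List.map_congr_left
  intro j _
  simp only [Function.comp_apply]
  exact rowB_eq pat j

-- ===== VERDICT (by name: the statement is the Claim_ definition above) =====
theorem pattern_to_tableau_spec : Claim_equal_pattern_to_tableau := by
  intro pat _ _
  unfold Spec_pattern_to_tableau
  rw [A_eq, B_eq]
  apply List.map_congr_left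
  intro j hj
  have hjn : j < pat.length := List.mem_range.mp hj
  have h := contrib_eq pat pat.length 0 j (by omega) hjn
  have hmax : max (j : Int) ((0 : Nat) : Int) = (j : Int) := by simp
  have hflat := flatMap_runs (fun i => (pvDiff pat (j : Int) i).toNat)
    ((pat.length : Int) - (j : Int)).toNat (j : Int) (pat.length : Int) (le_refl _)
  have hbr : (fun i => List.replicate ((pvDiff pat (j : Int) i).toNat) (i + 1))
      = pvBrun pat j := rfl
  rw [hbr] at hflat
  simpa [pvPreAt, hmax, hflat] using h
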